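-- pv_equiv track=rewrite | github.com/Nairod-007/SAE_1.5 | donnees voitures.py | remplacer_caracteres
-- ===== SOURCE A (Python) =====
-- def remplacer_caracteres(nom):
--     mot_modifie = ""
--     for caractere in nom:
--         if caractere == ':':
--             mot_modifie += '%3A'
--         else:
--             mot_modifie += caractere
--     return mot_modifie
-- ===== SOURCE B (Python) =====
-- def remplacer_caracteres(nom):
--     return '%3A'.join(nom.split(':'))
-- ===== Notes on version B (the rewrite author's own statement) =====
-- stated objective: idiomatic
-- what changed: Replaces the per-character loop with a branch and repeated string concatenation by a delimiter-partition pass (split on the colon) followed by a single join with the escape sequence as separator.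
import Mathlib
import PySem

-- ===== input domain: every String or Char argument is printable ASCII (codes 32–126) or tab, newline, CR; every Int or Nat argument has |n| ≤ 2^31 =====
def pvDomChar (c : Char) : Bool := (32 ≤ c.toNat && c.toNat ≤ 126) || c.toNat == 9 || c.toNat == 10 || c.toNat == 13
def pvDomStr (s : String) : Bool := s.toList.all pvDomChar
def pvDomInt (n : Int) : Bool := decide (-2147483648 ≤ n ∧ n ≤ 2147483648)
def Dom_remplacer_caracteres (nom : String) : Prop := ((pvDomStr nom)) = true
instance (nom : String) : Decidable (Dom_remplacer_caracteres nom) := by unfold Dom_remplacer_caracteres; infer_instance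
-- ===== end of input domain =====

-- B replaces A's per-character loop (branch + string concatenation) by split-on-':' then join with '%3A' (idiomatic).


-- ===== PORT A =====
-- for each character: append '%3A' if it is ':', else the character itself
def remplacer_caracteres (nom : String) : String :=
  String.ofList
    (nom.toList.foldl (fun acc c => acc ++ (if c = ':' then ['%', '3', 'A'] else [c])) [])

-- ===== PORT B =====
-- '%3A'.join(nom.split(':'))
def remplacer_caracteres_alt (nom : String) : String :=
  PySem.Str.join "%3A" ((PySem.Chars.splitOn nom.toList [':']).map String.ofList)

-- ===== PRECONDITION & SPEC =====
def Spec_remplacer_caracteres (nom : String) (out : String) : Prop := out = remplacer_caracteres_alt nom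
instance (nom : String) (out : String) : Decidable (Spec_remplacer_caracteres nom out) := by unfold Spec_remplacer_caracteres; infer_instance

-- ===== CLAIM (what is proved, stated in full; the proofs are below) =====
def Claim_equal_remplacer_caracteres : Prop := ∀ (nom : String), Dom_remplacer_caracteres nom → Spec_remplacer_caracteres nom (remplacer_caracteres nom)

-- ===== LEMMAS AND PROOFS =====

-- pure recursive description of splitOn.go for separator [':']
def pvSplit (l cur : List Char) : List (List Char) :=
  match l with
  | [] => [cur.reverse]
  | c :: rest => if c = ':' then cur.reverse :: pvSplit rest [] else pvSplit rest (c :: cur)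

theorem pvSplit_ne_nil (l cur : List Char) : pvSplit l cur ≠ [] := by
  induction l generalizing cur with
  | nil => simp [pvSplit]
  | cons c rest ih => simp only [pvSplit]; split_ifs <;> simp [ih]

theorem go_cons (fuel : Nat) (c : Char) (rest cur : List Char) (acc : List (List Char)) :
    PySem.Chars.splitOn.go [':'] (fuel + 1) (c :: rest) cur acc =
      if c = ':' then PySem.Chars.splitOn.go [':'] fuel rest [] (cur.reverse :: acc)
      else PySem.Chars.splitOn.go [':'] fuel rest (c :: cur) acc := by
  have h0 : PySem.Chars.splitOn.go [':'] (fuel + 1) (c :: rest) cur acc =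
      if [':'].isPrefixOf (c :: rest) = true then
        PySem.Chars.splitOn.go [':'] fuel (List.drop 1 (c :: rest)) [] (cur.reverse :: acc)
      else PySem.Chars.splitOn.go [':'] fuel rest (c :: cur) acc := by
    rw [PySem.Chars.splitOn.go.eq_def]; rfl
  rw [h0]
  by_cases hc : c = ':'
  · subst hc
    rw [if_pos (by simp [List.isPrefixOf]), if_pos rfl, List.drop_one, List.tail_cons]
  · rw [if_neg (by simp [List.isPrefixOf, beq_iff_eq]; intro hh; exact hc hh.symm), if_neg hc]

theorem go_eq_pvSplit (fuel : Nat) (l cur : List Char) (acc : List (List Char))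
    (h : l.length ≤ fuel) :
    PySem.Chars.splitOn.go [':'] fuel l cur acc = acc.reverse ++ pvSplit l cur := by
  induction fuel generalizing l cur acc with
  | zero =>
    have : l = [] := List.length_eq_zero_iff.mp (Nat.le_zero.mp h)
    subst this
    rw [PySem.Chars.splitOn.go.eq_def]
    simp [pvSplit]
  | succ fuel ih =>
    cases l with
    | nil =>
      rw [PySem.Chars.splitOn.go.eq_def]
      simp [pvSplit]
    | cons c rest =>
      rw [go_cons]
      simp only [List.length_cons] at h
      by_cases hc : c = ':'
      · subst hc
        rw [if_pos rfl, ih rest [] _ (Nat.le_of_succ_le_succ h)]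
        simp [pvSplit]
      · rw [if_neg hc, ih rest (c :: cur) acc (Nat.le_of_succ_le_succ h)]
        simp [pvSplit, hc]

def pvRep (c : Char) : List Char := if c = ':' then ['%', '3', 'A'] else [c]

theorem join_pvSplit (l cur : List Char) :
    PySem.Chars.join ['%', '3', 'A'] (pvSplit l cur) = cur.reverse ++ l.flatMap pvRep := by
  induction l generalizing cur with
  | nil => simp [pvSplit, PySem.Chars.join, List.intercalate]
  | cons c rest ih =>
    by_cases hc : c = ':'
    · subst hc
      obtain ⟨p, ps, hps⟩ := List.exists_cons_of_ne_nil (pvSplit_ne_nil rest [])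
      rw [show pvSplit (':' :: rest) cur = cur.reverse :: pvSplit rest [] from by simp [pvSplit]]
      rw [hps, PySem.Chars.join_cons_cons, ← hps, ih []]
      simp [pvRep]
    · rw [show pvSplit (c :: rest) cur = pvSplit rest (c :: cur) from by simp [pvSplit, hc]]
      rw [ih (c :: cur)]
      simp [pvRep, hc]

-- ===== VERDICT (by name: the statement is the Claim_ definition above) =====
theorem remplacer_caracteres_spec : Claim_equal_remplacer_caracteres := by
  intro nom _
  unfold Spec_remplacer_caracteres remplacer_caracteres remplacer_caracteres_alt
  rw [PySem.List.foldl_append_eq_flatMap]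
  unfold PySem.Str.join PySem.Chars.splitOn
  rw [go_eq_pvSplit _ _ _ _ (Nat.le_succ _)]
  have hmap : List.map String.toList ((pvSplit nom.toList []).map String.ofList)
      = pvSplit nom.toList [] := by
    rw [List.map_map]
    simp [Function.comp_def]
  simp only [List.reverse_nil, List.nil_append, hmap]
  rw [show "%3A".toList = ['%', '3', 'A'] from by decide, join_pvSplit]
  rfl
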